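-- pv_equiv track=rewrite | github.com/maksim-shaidulin/CodeSignalTasks | CodeSignal/008_matrixElementsSum.py | matrixElementsSum
-- ===== SOURCE A (Python) =====
-- def matrixElementsSum(matrix):
--     total_cost = 0
--
--     rotated = tuple(zip(*matrix[::1]))
--     for i in range(len(rotated)):
--         for j in rotated[i]:
--             if j == 0:
--                 break
--             total_cost += j
--     return total_cost
--
-- matrix = [[0, 1, 1, 2], [0, 5, 0, 0], [2, 0, 3, 3]]
-- ===== SOURCE B (Python) =====
-- def matrixElementsSum(matrix):
--     ncols = min((len(r) for r in matrix), default=0)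
--     blocked = set()
--     total = 0
--     for row in matrix:
--         for c in range(ncols):
--             if c not in blocked:
--                 v = row[c]
--                 if v == 0:
--                     blocked.add(c)
--                 else:
--                     total += v
--     return total
-- ===== Notes on version B (the rewrite author's own statement) =====
-- stated objective: alternative
-- what changed: Replaces the zip-based transpose with a single row-by-row pass that keeps a set of already-zeroed column indices; no transposed structure is ever built.
import Mathlib
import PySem

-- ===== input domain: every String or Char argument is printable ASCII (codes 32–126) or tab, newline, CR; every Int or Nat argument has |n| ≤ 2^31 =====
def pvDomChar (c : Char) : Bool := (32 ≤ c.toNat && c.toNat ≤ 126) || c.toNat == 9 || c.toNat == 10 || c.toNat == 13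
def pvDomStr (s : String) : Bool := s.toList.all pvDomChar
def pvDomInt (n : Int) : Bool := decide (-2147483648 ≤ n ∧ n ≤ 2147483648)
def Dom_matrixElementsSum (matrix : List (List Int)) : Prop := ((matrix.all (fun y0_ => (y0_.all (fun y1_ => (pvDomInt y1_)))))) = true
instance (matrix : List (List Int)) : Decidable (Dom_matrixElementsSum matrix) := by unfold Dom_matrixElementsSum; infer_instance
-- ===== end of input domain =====

-- B drops A's zip-based transpose and sweeps the matrix row by row, keeping a set of
-- column indices that already hit a zero (alternative decomposition, same cost).

-- ===== PORT A =====
-- number of columns zip(*rows) produces: the shortest row length (0 when there are no rows)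
def pvMinCols (rows : List (List Int)) : Nat :=
  match rows with
  | [] => 0
  | r :: rs => rs.foldl (fun a s => Nat.min a s.length) r.length

-- contract port of the builtin tuple(zip(*matrix[::1])): column c collects the c-th
-- element of every row (c < pvMinCols rows, so getD's default is never used)
def pvZipStar (rows : List (List Int)) : List (List Int) :=
  (List.range (pvMinCols rows)).map (fun c => rows.map (fun r => r.getD c 0))

-- inner loop 'for j in rotated[i]: if j == 0: break; total_cost += j'
def pvInnerA (acc : Int) : List Int → Int
  | [] => acc
  | j :: rest => if j = 0 then acc else pvInnerA (acc + j) rest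

def matrixElementsSum (matrix : List (List Int)) : Int :=
  let rotated := pvZipStar matrix
  (PySem.List.pyRange 0 rotated.length 1).foldl
    (fun total i => pvInnerA total (PySem.List.pyGetD rotated i [])) 0

-- ===== PORT B =====
-- body of B's inner loop over c in range(ncols)
def pvStepCell (row : List Int) (st : PySem.Set Int × Int) (c : Int) : PySem.Set Int × Int :=
  if PySem.Set.contains st.1 c then st
  else
    let v := PySem.List.pyGetD row c 0  -- row[c]: 0 ≤ c < ncols ≤ len(row), so exact
    if v = 0 then (PySem.Set.add st.1 c, st.2) else (st.1, st.2 + v)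

-- body of B's outer loop over the rows
def pvStepRow (ncols : Nat) (st : PySem.Set Int × Int) (row : List Int) : PySem.Set Int × Int :=
  (PySem.List.pyRange 0 (ncols : Int) 1).foldl (pvStepCell row) st

def matrixElementsSum_alt (matrix : List (List Int)) : Int :=
  -- ncols = min((len(r) for r in matrix), default=0)
  let ncols : Nat :=
    match matrix.map List.length with
    | [] => 0
    | x :: xs => xs.foldl Nat.min x
  (matrix.foldl (pvStepRow ncols) (PySem.Set.empty, 0)).2

-- ===== PRECONDITION & SPEC =====
def Spec_matrixElementsSum (matrix : List (List Int)) (out : Int) : Prop := out = matrixElementsSum_alt matrix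
instance (matrix : List (List Int)) (out : Int) : Decidable (Spec_matrixElementsSum matrix out) := by unfold Spec_matrixElementsSum; infer_instance

-- ===== CLAIM (what is proved, stated in full; the proofs are below) =====
def Claim_equal_matrixElementsSum : Prop := ∀ (matrix : List (List Int)), Dom_matrixElementsSum matrix → Spec_matrixElementsSum matrix (matrixElementsSum matrix)

-- ===== LEMMAS AND PROOFS =====

theorem pvInnerA_acc (l : List Int) (acc : Int) : pvInnerA acc l = acc + pvInnerA 0 l := by
  induction l generalizing acc with
  | nil => simp [pvInnerA]
  | cons j rest ih =>
    by_cases hj : j = 0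
    · simp [pvInnerA, hj]
    · simp only [pvInnerA, if_neg hj]
      rw [ih (acc + j), ih (0 + j)]; ring

theorem pvInnerA_cons (v : Int) (l : List Int) (hv : v ≠ 0) :
    pvInnerA 0 (v :: l) = v + pvInnerA 0 l := by
  simp only [pvInnerA, if_neg hv]
  rw [pvInnerA_acc]; ring

theorem pvFoldlInnerA (l : List (List Int)) (t : Int) :
    l.foldl pvInnerA t = t + (l.map (pvInnerA 0)).sum := by
  induction l generalizing t with
  | nil => simp
  | cons x xs ih =>
    simp only [List.foldl_cons, List.map_cons, List.sum_cons]
    rw [ih, pvInnerA_acc]; ring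

theorem pvRangeCast (n : Nat) :
    PySem.List.pyRange 0 (n : Int) 1 = (List.range n).map (fun (k : Nat) => (k : Int)) := by
  rw [PySem.List.pyRange_one]
  simp [List.map_eq_flatMap]

-- what one row does to the state: blocked columns gain exactly this row's zero columns
-- (among the first n), and the total gains this row's unblocked non-zero entries
theorem pvInnerSpec (row : List Int) (S : PySem.Set Int) (t : Int) (n : Nat) :
    (∀ x : Int, x ∈ (((List.range n).map (fun (k : Nat) => (k : Int))).foldl (pvStepCell row) (S, t)).1 ↔
        (x ∈ S ∨ ∃ k : Nat, k < n ∧ x = (k : Int) ∧ row.getD k 0 = 0)) ∧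
    (((List.range n).map (fun (k : Nat) => (k : Int))).foldl (pvStepCell row) (S, t)).2 =
      t + ((List.range n).map
            (fun (k : Nat) => if ((k : Int)) ∈ S ∨ row.getD k 0 = 0 then 0 else row.getD k 0)).sum := by
  induction n with
  | zero => simp
  | succ n ih =>
    obtain ⟨ih1, ih2⟩ := ih
    rw [List.range_succ, List.map_append, List.foldl_append]
    simp only [List.map_cons, List.map_nil, List.foldl_cons, List.foldl_nil]
    set M := (((List.range n).map (fun (k : Nat) => (k : Int))).foldl (pvStepCell row) (S, t)) with hM
    have hmem : ((n : Int) ∈ M.1) ↔ ((n : Int) ∈ S) := by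
      rw [ih1]
      constructor
      · rintro (h | ⟨k, hk, he, _⟩)
        · exact h
        · exfalso
          have : n = k := by exact_mod_cast he
          omega
      · exact Or.inl
    have hg : PySem.List.pyGetD row ((n : Int)) 0 = row.getD n 0 := by simp
    by_cases hS : (n : Int) ∈ M.1
    · have hc : PySem.Set.contains M.1 (n : Int) = true := (PySem.Set.contains_iff _ _).mpr hS
      have hSn : (n : Int) ∈ S := hmem.mp hS
      rw [pvStepCell, if_pos hc]
      constructor
      · intro x
        rw [ih1]
        constructor
        · rintro (h | ⟨k, hk, hx, hz⟩)
          · exact Or.inl h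
          · exact Or.inr ⟨k, by omega, hx, hz⟩
        · rintro (h | ⟨k, hk, hx, hz⟩)
          · exact Or.inl h
          · rcases Nat.lt_succ_iff_lt_or_eq.mp hk with h' | h'
            · exact Or.inr ⟨k, h', hx, hz⟩
            · subst h'; subst hx; exact Or.inl hSn
      · rw [ih2, List.map_append, List.sum_append]
        simp [hSn]
    · have hc : PySem.Set.contains M.1 (n : Int) = false := by
        rw [← Bool.not_eq_true, PySem.Set.contains_iff]; exact hS
      have hSn : ¬ (n : Int) ∈ S := fun h => hS (hmem.mpr h)
      rw [pvStepCell, if_neg (by simp; exact hS)]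
      simp only [hg]
      by_cases hz : row.getD n 0 = 0
      · rw [if_pos hz]
        constructor
        · intro x
          rw [PySem.Set.mem_add, ih1]
          constructor
          · rintro ((h | ⟨k, hk, hx, hzz⟩) | h)
            · exact Or.inl h
            · exact Or.inr ⟨k, by omega, hx, hzz⟩
            · exact Or.inr ⟨n, by omega, h, hz⟩
          · rintro (h | ⟨k, hk, hx, hzz⟩)
            · exact Or.inl (Or.inl h)
            · rcases Nat.lt_succ_iff_lt_or_eq.mp hk with h' | h'
              · exact Or.inl (Or.inr ⟨k, h', hx, hzz⟩)
              · subst h'; exact Or.inr hx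
        · rw [ih2, List.map_append, List.sum_append]
          have hz' : row[n]?.getD 0 = 0 := by simpa using hz
          simp [hz']
      · rw [if_neg hz]
        constructor
        · intro x
          rw [ih1]
          constructor
          · rintro (h | ⟨k, hk, hx, hzz⟩)
            · exact Or.inl h
            · exact Or.inr ⟨k, by omega, hx, hzz⟩
          · rintro (h | ⟨k, hk, hx, hzz⟩)
            · exact Or.inl h
            · rcases Nat.lt_succ_iff_lt_or_eq.mp hk with h' | h'
              · exact Or.inr ⟨k, h', hx, hzz⟩
              · subst h'; exact absurd hzz hz
        · rw [ih2, List.map_append, List.sum_append]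
          have hz' : ¬ row[n]?.getD 0 = 0 := by simpa using hz
          simp [hSn, hz', add_assoc]

-- the whole row sweep computes, per still-unblocked column, the column's sum up to its first zero
theorem pvOuterSpec (n : Nat) (rows : List (List Int)) (S : PySem.Set Int) (t : Int) :
    (rows.foldl (pvStepRow n) (S, t)).2 =
      t + ((List.range n).map (fun (c : Nat) =>
            if ((c : Int)) ∈ S then 0
            else pvInnerA 0 (rows.map (fun r => r.getD c 0)))).sum := by
  induction rows generalizing S t with
  | nil =>
    simp [pvInnerA]
  | cons r rows ih =>
    simp only [List.foldl_cons]
    have hstep : pvStepRow n (S, t) r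
        = ((List.range n).map (fun (k : Nat) => (k : Int))).foldl (pvStepCell r) (S, t) := by
      unfold pvStepRow; rw [pvRangeCast]
    obtain ⟨h1, h2⟩ := pvInnerSpec r S t n
    rw [hstep]
    set M := (((List.range n).map (fun (k : Nat) => (k : Int))).foldl (pvStepCell r) (S, t)) with hM
    have hMpair : M = (M.1, M.2) := rfl
    rw [hMpair, ih M.1 M.2, h2]
    rw [add_assoc, ← PySem.List.sum_map_add_int]
    congr 1
    refine congrArg List.sum (List.map_congr_left ?_)
    intro c hcmem
    have hcn : c < n := List.mem_range.mp hcmem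
    have hS' : ((c : Int)) ∈ M.1 ↔ ((c : Int)) ∈ S ∨ r.getD c 0 = 0 := by
      rw [h1]
      constructor
      · rintro (h | ⟨k, hk, hx, hz⟩)
        · exact Or.inl h
        · have : c = k := by exact_mod_cast hx
          subst this; exact Or.inr hz
      · rintro (h | h)
        · exact Or.inl h
        · exact Or.inr ⟨c, hcn, rfl, h⟩
    simp only [List.map_cons]
    by_cases hS : ((c : Int)) ∈ S
    · simp [hS, hS'.mpr (Or.inl hS)]
    · by_cases hz : r.getD c 0 = 0
      · have hin : ((c : Int)) ∈ M.1 := hS'.mpr (Or.inr hz)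
        have hz' : r[c]?.getD 0 = 0 := by simpa using hz
        simp [hS, hin, hz', pvInnerA]
      · have hnin : ¬ ((c : Int)) ∈ M.1 := fun h => by
          rcases hS'.mp h with h' | h' <;> [exact hS h'; exact hz h']
        have hcond : ¬ (((c : Int)) ∈ S ∨ r.getD c 0 = 0) := by tauto
        rw [if_neg hcond, if_neg hnin, if_neg hS, pvInnerA_cons _ _ hz]

theorem pvNcolsEq (matrix : List (List Int)) :
    (match matrix.map List.length with
      | [] => 0
      | x :: xs => xs.foldl Nat.min x) = pvMinCols matrix := by
  cases matrix with
  | nil => rfl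
  | cons r rs =>
    simp only [List.map_cons, pvMinCols]
    rw [List.foldl_map]

-- ===== VERDICT (by name: the statement is the Claim_ definition above) =====
theorem matrixElementsSum_spec : Claim_equal_matrixElementsSum := by
  intro matrix _
  unfold Spec_matrixElementsSum matrixElementsSum matrixElementsSum_alt
  rw [pvNcolsEq]
  have hA : (PySem.List.pyRange 0 ((pvZipStar matrix).length : Int) 1).foldl
      (fun total i => pvInnerA total (PySem.List.pyGetD (pvZipStar matrix) i [])) 0
      = (pvZipStar matrix).foldl pvInnerA 0 := by
    have := PySem.List.foldl_pyRange_zero_pyGetD (pvZipStar matrix) [] pvInnerA 0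
    simpa [PySem.List.len] using this
  rw [hA, pvFoldlInnerA, pvOuterSpec]
  congr 1
  unfold pvZipStar
  rw [List.map_map]
  refine congrArg List.sum (List.map_congr_left ?_)
  intro c hc
  simp [Function.comp, PySem.Set.empty]
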